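-- pv_equiv track=rewrite | github.com/rafavaliev/nginx-log-inspect | src/statistics.py | ip_by_countries
-- ===== SOURCE A (Python) =====
-- def ip_by_countries(ip_request_dict):
--     country_dict = {}
--
--     for ip in ip_request_dict:
--         country = ip_request_dict[ip][0]["country"]
--         if country in country_dict:
--             country_dict[country].append(ip_request_dict[ip])
--         else:
--             country_dict[country] = [ip_request_dict[ip]]
--     return country_dict
-- ===== SOURCE B (Python) =====
-- def ip_by_countries(ip_request_dict):
--     rows = [(reqs[0]["country"], reqs) for reqs in ip_request_dict.values()]
--     return {c: [reqs for c2, reqs in rows if c2 == c]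
--             for c in dict.fromkeys(c for c, _ in rows)}
-- ===== Notes on version B (the rewrite author's own statement) =====
-- stated objective: alternative
-- what changed: Replaces A's incremental insert-or-append dict accumulation with a single precomputed (country, requests) row list followed by a grouped comprehension over the first-occurrence-deduplicated countries (dict.fromkeys).
import Mathlib
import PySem

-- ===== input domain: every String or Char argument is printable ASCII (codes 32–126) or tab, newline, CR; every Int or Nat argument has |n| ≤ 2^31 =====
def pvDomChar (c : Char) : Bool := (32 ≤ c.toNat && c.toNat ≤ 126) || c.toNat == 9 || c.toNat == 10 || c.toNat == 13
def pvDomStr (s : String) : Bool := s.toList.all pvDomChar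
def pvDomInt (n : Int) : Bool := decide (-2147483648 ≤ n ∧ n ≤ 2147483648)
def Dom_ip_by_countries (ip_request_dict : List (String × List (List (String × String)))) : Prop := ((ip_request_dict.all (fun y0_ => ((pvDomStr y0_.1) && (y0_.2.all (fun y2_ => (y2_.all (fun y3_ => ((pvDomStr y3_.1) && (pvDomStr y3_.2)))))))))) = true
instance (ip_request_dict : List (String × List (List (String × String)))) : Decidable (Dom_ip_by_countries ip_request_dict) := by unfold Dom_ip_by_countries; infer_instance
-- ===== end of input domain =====

-- B replaces A's incremental insert-or-append dict accumulation with a precomputed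
-- (country, requests) row list and a grouped comprehension over the deduplicated countries.


-- ===== PORT A =====
-- ip_request_dict[ip][0]["country"] (total form; Pre_ guarantees the index and key exist)
def pvCountry (reqs : List (List (String × String))) : String :=
  (PySem.Dict.mk ((PySem.List.pyGet? reqs 0).getD [])).getD "country" ""

def ip_by_countries (ip_request_dict : List (String × List (List (String × String)))) : List (String × List (List (List (String × String)))) :=
  (ip_request_dict.foldl (fun country_dict p =>
      let country := pvCountry p.2
      match country_dict.get? country with
      | some lst => country_dict.insert country (lst ++ [p.2])
      | none => country_dict.insert country [p.2])
    (PySem.Dict.empty : PySem.Dict String (List (List (List (String × String)))))).items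

-- ===== PORT B =====
def ip_by_countries_alt (ip_request_dict : List (String × List (List (String × String)))) : List (String × List (List (List (String × String)))) :=
  let rows := ip_request_dict.map (fun p => (pvCountry p.2, p.2))
  (PySem.Set.ofList (rows.map Prod.fst)).map
    (fun c => (c, (rows.filter (fun r => r.1 == c)).map Prod.snd))

-- ===== PRECONDITION & SPEC =====
-- Pre_ excludes exactly the inputs where A raises: an empty request list (IndexError) or a
-- first request without a "country" key (KeyError).
def Pre_ip_by_countries (ip_request_dict : List (String × List (List (String × String)))) : Prop :=
  ∀ p ∈ ip_request_dict, p.2 ≠ [] ∧ "country" ∈ (p.2.headD []).map Prod.fst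
instance (ip_request_dict : List (String × List (List (String × String)))) : Decidable (Pre_ip_by_countries ip_request_dict) := by unfold Pre_ip_by_countries; infer_instance

def pvWitness_ip_by_countries : (List (String × List (List (String × String)))) :=
  [("1.2.3.4", [[("country", "DE"), ("path", "/")]]), ("5.6.7.8", [[("country", "DE")], [("country", "FR")]])]

def Spec_ip_by_countries (ip_request_dict : List (String × List (List (String × String)))) (out : List (String × List (List (List (String × String))))) : Prop := out = ip_by_countries_alt ip_request_dict
instance (ip_request_dict : List (String × List (List (String × String)))) (out : List (String × List (List (List (String × String))))) : Decidable (Spec_ip_by_countries ip_request_dict out) := by unfold Spec_ip_by_countries; infer_instance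

-- ===== CLAIM (what is proved, stated in full; the proofs are below) =====
def Claim_equal_ip_by_countries : Prop := ∀ (ip_request_dict : List (String × List (List (String × String)))), Dom_ip_by_countries ip_request_dict → Pre_ip_by_countries ip_request_dict → Spec_ip_by_countries ip_request_dict (ip_by_countries ip_request_dict)

-- ===== LEMMAS AND PROOFS =====

-- A's insert-or-append branch is exactly Dict.modify with default [].
theorem ipbc_step_eq_modify (d : PySem.Dict String (List (List (List (String × String))))) (c : String) (v : List (List (String × String))) :
    (match d.get? c with
     | some lst => d.insert c (lst ++ [v])
     | none => d.insert c [v]) = d.modify c [] (· ++ [v]) := by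
  cases h : d.get? c with
  | some lst =>
      simp [PySem.Dict.modify, PySem.Dict.getD_eq_get?_getD, h]
  | none =>
      simp [PySem.Dict.modify, PySem.Dict.getD_eq_get?_getD, h]

theorem ipbc_foldl_eq (l : List (String × List (List (String × String)))) (d : PySem.Dict String (List (List (List (String × String))))) :
    (l.foldl (fun country_dict p =>
      let country := pvCountry p.2
      match country_dict.get? country with
      | some lst => country_dict.insert country (lst ++ [p.2])
      | none => country_dict.insert country [p.2]) d)
    = (l.map (fun p => (pvCountry p.2, p.2))).foldl (fun d r => d.modify r.1 [] (· ++ [r.2])) d := by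
  have h : (fun (country_dict : PySem.Dict String (List (List (List (String × String))))) (p : String × List (List (String × String))) =>
      let country := pvCountry p.2
      match country_dict.get? country with
      | some lst => country_dict.insert country (lst ++ [p.2])
      | none => country_dict.insert country [p.2])
      = fun country_dict p => country_dict.modify (pvCountry p.2) [] (· ++ [p.2]) := by
    funext cd p
    exact ipbc_step_eq_modify cd (pvCountry p.2) p.2
  rw [h, List.foldl_map]

-- ===== VERDICT (by name: the statement is the Claim_ definition above) =====
theorem ip_by_countries_spec : Claim_equal_ip_by_countries := by
  intro l _ _
  unfold Spec_ip_by_countries ip_by_countries ip_by_countries_alt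
  rw [ipbc_foldl_eq]
  set rows := l.map (fun p => (pvCountry p.2, p.2)) with hrows
  have hnd : ((rows.foldl (fun d r => d.modify r.1 [] (· ++ [r.2])) PySem.Dict.empty)).keys.Nodup := by
    have := PySem.Dict.nodup_keys_foldl_modify_key rows Prod.fst [] (fun _ r v => v ++ [r.2]) PySem.Dict.empty PySem.Dict.nodup_keys_empty
    simpa using this
  rw [PySem.Dict.items_eq_map_keys _ hnd []]
  have hkeys : ((rows.foldl (fun d r => d.modify r.1 [] (· ++ [r.2])) PySem.Dict.empty)).keys = PySem.Set.ofList (rows.map Prod.fst) := by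
    have := PySem.Dict.keys_foldl_modify_key rows Prod.fst [] (fun _ r v => v ++ [r.2]) (PySem.Dict.empty : PySem.Dict String (List (List (List (String × String)))))
    simpa [PySem.Dict.keys_empty, PySem.Set.ofList_eq_foldl, PySem.Set.update] using this
  rw [hkeys]
  apply List.map_congr_left
  intro c hc
  have := PySem.Dict.getD_foldl_modify_append rows (PySem.Dict.empty : PySem.Dict String (List (List (List (String × String))))) c
  simp only [PySem.Dict.getD_empty, List.nil_append] at this
  simp [this]
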